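-- pv_equiv track=rewrite | github.com/haribary/HASS | src/synth_phonemes.py | _bisect_ipa
-- ===== SOURCE A (Python) =====
-- def _bisect_ipa(ipa: str) -> tuple[str, str]:
--     """Split an IPA string into two halves at the nearest comma or space to the midpoint."""
--     mid = len(ipa) // 2
--     # Prefer splitting at a comma near the midpoint
--     best = -1
--     best_dist = len(ipa)
--     for i, c in enumerate(ipa):
--         if c == ',' and abs(i - mid) < best_dist:
--             best = i
--             best_dist = abs(i - mid)
--     if best != -1 and best_dist < len(ipa) // 4:
--         return ipa[:best + 1].strip(), ipa[best + 1:].strip()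
--     # Fall back to nearest space
--     best = -1
--     best_dist = len(ipa)
--     for i, c in enumerate(ipa):
--         if c == ' ' and abs(i - mid) < best_dist:
--             best = i
--             best_dist = abs(i - mid)
--     if best != -1:
--         return ipa[:best].strip(), ipa[best + 1:].strip()
--     # No split point found, return as-is
--     return ipa, ""
-- ===== SOURCE B (Python) =====
-- def _bisect_ipa(ipa: str) -> tuple[str, str]:
--     """Split an IPA string into two halves at the nearest comma or space to the midpoint."""
--     mid = len(ipa) // 2
--
--     def outward(ch):
--         # walk outward from the midpoint; left side first on equal distance
--         for d in range(len(ipa) + 1):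
--             i = mid - d
--             if 0 <= i < len(ipa) and ipa[i] == ch:
--                 return i, d
--             j = mid + d
--             if d > 0 and j < len(ipa) and ipa[j] == ch:
--                 return j, d
--         return None
--
--     hit = outward(',')
--     if hit is not None and hit[1] < len(ipa) // 4:
--         b = hit[0]
--         return ipa[:b + 1].strip(), ipa[b + 1:].strip()
--     hit = outward(' ')
--     if hit is not None:
--         b = hit[0]
--         return ipa[:b].strip(), ipa[b + 1:].strip()
--     return ipa, ""
-- ===== Notes on version B (the rewrite author's own statement) =====
-- stated objective: alternative
-- what changed: A's two full linear scans keeping a (best, best_dist) accumulator are replaced by a midpoint-outward search that probes indices mid-d, mid+d for d = 0,1,2,... and stops at the first delimiter found (left side first on ties, reproducing A's strict '<' tie-breaking).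
import Mathlib
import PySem

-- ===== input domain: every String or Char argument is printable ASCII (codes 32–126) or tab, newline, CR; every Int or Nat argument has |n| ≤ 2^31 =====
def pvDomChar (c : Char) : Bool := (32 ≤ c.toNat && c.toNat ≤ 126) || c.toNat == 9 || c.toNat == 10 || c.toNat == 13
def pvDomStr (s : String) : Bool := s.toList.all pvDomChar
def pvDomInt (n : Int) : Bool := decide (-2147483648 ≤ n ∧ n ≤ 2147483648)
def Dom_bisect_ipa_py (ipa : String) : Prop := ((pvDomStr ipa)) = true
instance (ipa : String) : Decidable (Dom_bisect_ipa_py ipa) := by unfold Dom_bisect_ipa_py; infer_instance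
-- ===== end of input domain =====

-- B replaces A's two full linear scans with a midpoint-outward search for the nearest
-- delimiter (left index first on ties); objective: alternative (different traversal, same cost class).


-- ===== PORT A =====
-- literal port of A: two linear scans keeping (best, best_dist), updating on strict '<'
def bisect_ipa_py (ipa : String) : String × String :=
  let n : Int := PySem.Str.len ipa
  let mid : Int := PySem.Int.floordiv n 2
  let st := (PySem.List.enumerate ipa.toList 0).foldl
    (fun (st : Int × Int) (p : Int × Char) =>
      if p.2 = ',' ∧ |p.1 - mid| < st.2 then (p.1, |p.1 - mid|) else st) (-1, n)
  if st.1 ≠ -1 ∧ st.2 < PySem.Int.floordiv n 4 then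
    (PySem.Str.strip (PySem.Str.slice ipa none (some (st.1 + 1))),
     PySem.Str.strip (PySem.Str.slice ipa (some (st.1 + 1)) none))
  else
    let st2 := (PySem.List.enumerate ipa.toList 0).foldl
      (fun (st : Int × Int) (p : Int × Char) =>
        if p.2 = ' ' ∧ |p.1 - mid| < st.2 then (p.1, |p.1 - mid|) else st) (-1, n)
    if st2.1 ≠ -1 then
      (PySem.Str.strip (PySem.Str.slice ipa none (some st2.1)),
       PySem.Str.strip (PySem.Str.slice ipa (some (st2.1 + 1)) none))
    else (ipa, "")

-- ===== PORT B =====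
-- B helper (= Source B's `outward`): walk outward from the midpoint m, d = 0,1,2,…, left index
-- first; `fuel` counts the remaining iterations of Python's `for d in range(len(ipa)+1)`
def pvOutward (cs : List Char) (m : Nat) (ch : Char) : Nat → Nat → Option (Nat × Nat)
  | 0, _ => none
  | fuel + 1, d =>
    if d ≤ m ∧ cs[m - d]? = some ch then some (m - d, d)
    else if 0 < d ∧ cs[m + d]? = some ch then some (m + d, d)
    else pvOutward cs m ch fuel (d + 1)

-- B helper: the space fallback of Source B (reached when no comma qualifies)
def bisect_ipa_py_altSpace (ipa : String) (cs : List Char) (mid : Nat) : String × String :=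
  match pvOutward cs mid ' ' (cs.length + 1) 0 with
  | some (b, _) =>
    (PySem.Str.strip (PySem.Str.slice ipa none (some (b : Int))),
     PySem.Str.strip (PySem.Str.slice ipa (some ((b : Int) + 1)) none))
  | none => (ipa, "")

def bisect_ipa_py_alt (ipa : String) : String × String :=
  let cs := ipa.toList
  let mid := cs.length / 2
  match pvOutward cs mid ',' (cs.length + 1) 0 with
  | some (b, d) =>
    if d < cs.length / 4 then
      (PySem.Str.strip (PySem.Str.slice ipa none (some ((b : Int) + 1))),
       PySem.Str.strip (PySem.Str.slice ipa (some ((b : Int) + 1)) none))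
    else bisect_ipa_py_altSpace ipa cs mid
  | none => bisect_ipa_py_altSpace ipa cs mid

-- ===== PRECONDITION & SPEC =====
def Spec_bisect_ipa_py (ipa : String) (out : String × String) : Prop := out = bisect_ipa_py_alt ipa
instance (ipa : String) (out : String × String) : Decidable (Spec_bisect_ipa_py ipa out) := by unfold Spec_bisect_ipa_py; infer_instance

-- ===== CLAIM (what is proved, stated in full; the proofs are below) =====
def Claim_equal_bisect_ipa_py : Prop := ∀ (ipa : String), Dom_bisect_ipa_py ipa → Spec_bisect_ipa_py ipa (bisect_ipa_py ipa)

-- ===== LEMMAS AND PROOFS =====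

-- the nearest-so-far accumulator both sides reduce to: keep the stored index unless strictly closer to mid
def pvG (mid : Int) : Option Int → Int → Option Int := fun s i =>
  match s with
  | none => some i
  | some j => if |i - mid| < |j - mid| then some i else some j

-- A's (best, best_dist) pair, as a function of the abstract Option state
def pvEncode (mid nI : Int) : Option Int → Int × Int :=
  fun s => match s with
  | none => (-1, nI)
  | some j => (j, |j - mid|)

-- the ascending list of indices of `ch` in `cs`
def pvT (cs : List Char) (ch : Char) : List Int :=
  ((PySem.List.enumerate cs 0).filter (fun p => p.2 == ch)).map Prod.fst


lemma pvMemT (cs : List Char) (ch : Char) (i : Int) :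
    i ∈ pvT cs ch ↔ ∃ k : Nat, k < cs.length ∧ i = (k : Int) ∧ cs[k]? = some ch := by
  simp only [pvT, List.mem_map, List.mem_filter, PySem.List.mem_enumerate_iff]
  constructor
  · rintro ⟨p, ⟨⟨k, hk, rfl⟩, hch⟩, rfl⟩
    simp only [beq_iff_eq] at hch
    exact ⟨k, hk, by omega, by simp [List.getElem?_eq_getElem hk, hch]⟩
  · rintro ⟨k, hk, rfl, hch⟩
    refine ⟨((k : Int), cs[k]), ⟨⟨k, hk, by simp⟩, ?_⟩, rfl⟩
    simp only [beq_iff_eq]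
    have := List.getElem?_eq_getElem hk
    rw [this] at hch; exact Option.some.inj hch

lemma pvPairwiseT (cs : List Char) (ch : Char) : (pvT cs ch).Pairwise (· < ·) := by
  unfold pvT
  refine List.Pairwise.map _ ?_ ((PySem.List.pairwise_lt_enumerate cs 0).filter _)
  exact fun p q h => h

lemma pvC0 (mid : Int) (l : List Int) (a : Int)
    (h : ∀ b ∈ l, |a - mid| ≤ |b - mid|) : l.foldl (pvG mid) (some a) = some a := by
  induction l with
  | nil => rfl
  | cons x t ih =>
    have hx := h x (by simp)
    simp only [List.foldl_cons, pvG]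
    rw [if_neg (by omega)]
    exact ih (fun b hb => h b (by simp [hb]))

lemma pvC2 (mid : Int) (l : List Int) (s : Option Int) (i : Int)
    (h : l.foldl (pvG mid) s = some i) : i ∈ l ∨ s = some i := by
  induction l generalizing s with
  | nil => exact Or.inr h
  | cons x t ih =>
    simp only [List.foldl_cons] at h
    rcases ih _ h with hm | hs
    · exact Or.inl (by simp [hm])
    · cases s with
      | none => simp [pvG] at hs; exact Or.inl (by simp [hs.symm]) -- hs : some x = some i
      | some j =>
        simp only [pvG] at hs
        split at hs
        · exact Or.inl (by simp [Option.some.inj hs])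
        · exact Or.inr hs

lemma pvC1 (mid : Int) (l : List Int) (s : Option Int) (a : Int)
    (ha : a ∈ l)
    (hmin : ∀ b ∈ l, |a - mid| ≤ |b - mid|)
    (htie : ∀ b ∈ l, |b - mid| = |a - mid| → a ≤ b)
    (hsort : l.Pairwise (· < ·))
    (hs : ∀ j, s = some j → |a - mid| < |j - mid|) :
    l.foldl (pvG mid) s = some a := by
  induction l generalizing s with
  | nil => cases ha
  | cons x t ih =>
    simp only [List.foldl_cons]
    rcases List.mem_cons.mp ha with rfl | hat
    · -- head is a: state becomes some a, then C0
      have hstep : pvG mid s a = some a := by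
        cases s with
        | none => rfl
        | some j => simp only [pvG]; rw [if_pos (hs j rfl)]
      rw [hstep]
      exact pvC0 mid t a (fun b hb => hmin b (by simp [hb]))
    · -- head x ≠ a (x < a), so |a-mid| < |x-mid|
      have hxa : x < a := (List.pairwise_cons.mp hsort).1 a hat
      have hlt : |a - mid| < |x - mid| := by
        rcases lt_or_eq_of_le (hmin x (by simp)) with h | h
        · exact h
        · exact absurd (htie x (by simp) h.symm) (by omega)
      refine ih _ hat (fun b hb => hmin b (List.mem_cons_of_mem _ hb))
        (fun b hb h => htie b (List.mem_cons_of_mem _ hb) h) (List.pairwise_cons.mp hsort).2 ?_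
      intro j hj
      cases s with
      | none => simp only [pvG] at hj; cases Option.some.inj hj; exact hlt
      | some j0 =>
        simp only [pvG] at hj
        split at hj
        · cases Option.some.inj hj; exact hlt
        · rw [← Option.some.inj hj]; exact hs j0 rfl

lemma pvScan (mid nI : Int) (ch : Char) (l : List (Int × Char)) (s : Option Int)
    (h : ∀ p ∈ l, p.2 = ch → |p.1 - mid| < nI) :
    l.foldl (fun (st : Int × Int) (p : Int × Char) =>
        if p.2 = ch ∧ |p.1 - mid| < st.2 then (p.1, |p.1 - mid|) else st) (pvEncode mid nI s)
      = pvEncode mid nI ((((l.filter (fun p => p.2 == ch)).map Prod.fst)).foldl (pvG mid) s) := by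
  induction l generalizing s with
  | nil => rfl
  | cons p t ih =>
    simp only [List.foldl_cons, List.filter_cons]
    by_cases hch : p.2 = ch
    · have hstep : (if p.2 = ch ∧ |p.1 - mid| < (pvEncode mid nI s).2 then (p.1, |p.1 - mid|) else pvEncode mid nI s)
          = pvEncode mid nI (pvG mid s p.1) := by
        cases s with
        | none =>
          simp only [pvEncode, pvG]
          rw [if_pos ⟨hch, h p (by simp) hch⟩]
        | some j =>
          simp only [pvEncode, pvG]
          by_cases hlt : |p.1 - mid| < |j - mid|
          · rw [if_pos ⟨hch, hlt⟩, if_pos hlt]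
          · rw [if_neg (by tauto), if_neg hlt]
      rw [hstep, if_pos (show (p.2 == ch) = true by simpa using hch)]
      simp only [List.map_cons, List.foldl_cons]
      exact ih _ (fun q hq => h q (List.mem_cons_of_mem _ hq))
    · have hstep : (if p.2 = ch ∧ |p.1 - mid| < (pvEncode mid nI s).2 then (p.1, |p.1 - mid|) else pvEncode mid nI s)
          = pvEncode mid nI s := by rw [if_neg (by tauto)]
      rw [hstep, if_neg (show ¬ (p.2 == ch) = true by simpa using hch)]
      exact ih _ (fun q hq => h q (List.mem_cons_of_mem _ hq))

lemma pvDistBound (cs : List Char) {ch : Char} (i : Int) (h : i ∈ pvT cs ch) :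
    0 ≤ i ∧ i < (cs.length : Int) ∧ |i - ((cs.length / 2 : Nat) : Int)| ≤ (cs.length : Int) := by
  obtain ⟨k, hk, rfl, -⟩ := (pvMemT cs ch _).mp h
  have hm : cs.length / 2 ≤ cs.length := Nat.div_le_self _ _
  constructor
  · positivity
  constructor
  · exact_mod_cast hk
  · rw [abs_le]; omega


lemma pvOutward_eq (cs : List Char) (ch : Char) (fuel d : Nat)
    (hfuel : cs.length + 1 ≤ fuel + d)
    (hmin : ∀ i ∈ pvT cs ch, (d : Int) ≤ |i - ((cs.length / 2 : Nat) : Int)|) :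
    pvOutward cs (cs.length / 2) ch fuel d
      = ((pvT cs ch).foldl (pvG ((cs.length / 2 : Nat) : Int)) none).map
          (fun i => (i.toNat, (i - ((cs.length / 2 : Nat) : Int)).natAbs)) := by
  induction fuel generalizing d with
  | zero =>
    have hT : pvT cs ch = [] := by
      rcases List.eq_nil_or_concat (pvT cs ch) with h | ⟨l, i, h⟩
      · exact h
      · exfalso
        have hi : i ∈ pvT cs ch := by rw [h]; simp
        have h1 := hmin i hi
        have h2 := (pvDistBound cs i hi).2.2
        simp only [Int.abs_eq_natAbs] at h1 h2
        omega
    rw [hT]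
    rfl
  | succ fuel ih =>
    simp only [pvOutward]
    by_cases h1 : d ≤ cs.length / 2 ∧ cs[cs.length / 2 - d]? = some ch
    · rw [if_pos h1]
      have hlt : cs.length / 2 - d < cs.length := (List.getElem?_eq_some_iff.mp h1.2).1
      have haT : ((cs.length / 2 - d : Nat) : Int) ∈ pvT cs ch :=
        (pvMemT cs ch _).mpr ⟨cs.length / 2 - d, hlt, rfl, h1.2⟩
      have hda : |((cs.length / 2 - d : Nat) : Int) - ((cs.length / 2 : Nat) : Int)| = (d : Int) := by
        have := h1.1
        simp only [Int.abs_eq_natAbs]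
        omega
      rw [pvC1 _ _ none _ haT ?_ ?_ (pvPairwiseT cs ch) (by simp)]
      · simp only [Option.map_some]
        have := h1.1
        refine congrArg some ?_
        simp only [Prod.mk.injEq]
        exact ⟨by omega, by omega⟩
      · intro b hb
        rw [hda]; exact hmin b hb
      · intro b hb heq
        obtain ⟨k, hk, rfl, -⟩ := (pvMemT cs ch _).mp hb
        rw [hda] at heq
        simp only [Int.abs_eq_natAbs] at heq
        have := h1.1
        omega
    · rw [if_neg h1]
      by_cases h2 : 0 < d ∧ cs[cs.length / 2 + d]? = some ch
      · rw [if_pos h2]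
        have hlt : cs.length / 2 + d < cs.length := (List.getElem?_eq_some_iff.mp h2.2).1
        have haT : ((cs.length / 2 + d : Nat) : Int) ∈ pvT cs ch :=
          (pvMemT cs ch _).mpr ⟨cs.length / 2 + d, hlt, rfl, h2.2⟩
        have hda : |((cs.length / 2 + d : Nat) : Int) - ((cs.length / 2 : Nat) : Int)| = (d : Int) := by
          simp only [Int.abs_eq_natAbs]
          omega
        rw [pvC1 _ _ none _ haT ?_ ?_ (pvPairwiseT cs ch) (by simp)]
        · refine congrArg some ?_
          simp only [Prod.mk.injEq]
          exact ⟨by omega, by omega⟩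
        · intro b hb
          rw [hda]; exact hmin b hb
        · intro b hb heq
          obtain ⟨k, hk, rfl, hke⟩ := (pvMemT cs ch _).mp hb
          rw [hda] at heq
          simp only [Int.abs_eq_natAbs] at heq
          have hk2 : k = cs.length / 2 + d ∨ (d ≤ cs.length / 2 ∧ k = cs.length / 2 - d) := by omega
          rcases hk2 with rfl | ⟨hdm, rfl⟩
          · omega
          · exact absurd ⟨hdm, hke⟩ h1
      · rw [if_neg h2]
        apply ih
        · omega
        · intro i hi
          have hd := hmin i hi
          obtain ⟨k, hk, rfl, hke⟩ := (pvMemT cs ch _).mp hi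
          simp only [Int.abs_eq_natAbs] at hd ⊢
          by_cases heq : (((k : Int) - ((cs.length / 2 : Nat) : Int)).natAbs : Nat) = d
          · exfalso
            have hk2 : k = cs.length / 2 + d ∨ (d ≤ cs.length / 2 ∧ k = cs.length / 2 - d) := by omega
            rcases hk2 with rfl | ⟨hdm, rfl⟩
            · rcases Nat.eq_zero_or_pos d with rfl | hd0
              · exact h1 ⟨by omega, by simpa using hke⟩
              · exact h2 ⟨hd0, hke⟩
            · exact h1 ⟨hdm, hke⟩
          · omega

-- distance/encode bookkeeping for an index produced by the fold
lemma pvFoldCases (cs : List Char) (ch : Char) (i : Int)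
    (h : (pvT cs ch).foldl (pvG ((cs.length / 2 : Nat) : Int)) none = some i) :
    ∃ k : Nat, k < cs.length ∧ i = (k : Int) := by
  rcases pvC2 _ _ _ _ h with hm | hs
  · obtain ⟨k, hk, rfl, -⟩ := (pvMemT cs ch _).mp hm
    exact ⟨k, hk, rfl⟩
  · cases hs

theorem bisect_ipa_py_spec : Claim_equal_bisect_ipa_py := by
  intro ipa _
  unfold Spec_bisect_ipa_py bisect_ipa_py bisect_ipa_py_alt bisect_ipa_py_altSpace
  simp only [PySem.Str.len_eq]
  rw [show ((2 : Int) = ((2 : Nat) : Int)) from rfl, show ((4 : Int) = ((4 : Nat) : Int)) from rfl,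
    PySem.Int.floordiv_natCast, PySem.Int.floordiv_natCast]
  have hbound : ∀ p ∈ PySem.List.enumerate ipa.toList 0, ∀ ch : Char, p.2 = ch →
      |p.1 - ((ipa.toList.length / 2 : Nat) : Int)| < (ipa.toList.length : Int) := by
    intro p hp ch _
    obtain ⟨k, hk, rfl⟩ := (PySem.List.mem_enumerate_iff _ _ _).mp hp
    simp only [zero_add, Int.abs_eq_natAbs]
    omega
  have hA := pvScan ((ipa.toList.length / 2 : Nat) : Int) (ipa.toList.length : Int) ','
    (PySem.List.enumerate ipa.toList 0) none (fun p hp => hbound p hp ',')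
  have hA2 := pvScan ((ipa.toList.length / 2 : Nat) : Int) (ipa.toList.length : Int) ' '
    (PySem.List.enumerate ipa.toList 0) none (fun p hp => hbound p hp ' ')
  rw [show pvEncode ((ipa.toList.length / 2 : Nat) : Int) (ipa.toList.length : Int) none
      = ((-1 : Int), (ipa.toList.length : Int)) from rfl] at hA hA2
  rw [show (((PySem.List.enumerate ipa.toList 0).filter (fun p => p.2 == ',')).map Prod.fst)
      = pvT ipa.toList ',' from rfl] at hA
  rw [show (((PySem.List.enumerate ipa.toList 0).filter (fun p => p.2 == ' ')).map Prod.fst)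
      = pvT ipa.toList ' ' from rfl] at hA2
  rw [hA, hA2]
  rw [pvOutward_eq ipa.toList ',' (ipa.toList.length + 1) 0 (by omega)
      (fun i _ => by simp),
    pvOutward_eq ipa.toList ' ' (ipa.toList.length + 1) 0 (by omega)
      (fun i _ => by simp)]
  rcases hc : (pvT ipa.toList ',').foldl (pvG ((ipa.toList.length / 2 : Nat) : Int)) none with _ | i
  · -- no comma: both fall to the space branch
    simp only [Option.map_none, pvEncode]
    rw [if_neg (by simp)]
    rcases hs : (pvT ipa.toList ' ').foldl (pvG ((ipa.toList.length / 2 : Nat) : Int)) none with _ | j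
    · simp
    · obtain ⟨k, hk, rfl⟩ := pvFoldCases _ _ _ hs
      simp only [Option.map_some]
      rw [if_pos (by omega)]
      simp only [Int.toNat_natCast]
  · obtain ⟨k, hk, rfl⟩ := pvFoldCases _ _ _ hc
    simp only [Option.map_some, pvEncode, Int.toNat_natCast]
    by_cases hcond : (((k : Int) - ((ipa.toList.length / 2 : Nat) : Int)).natAbs : Nat) < ipa.toList.length / 4
    · rw [if_pos ⟨by omega, by rw [Int.abs_eq_natAbs]; exact_mod_cast hcond⟩, if_pos hcond]
    · rw [if_neg (by rw [Int.abs_eq_natAbs]; intro hcontra; exact hcond (by exact_mod_cast hcontra.2)),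
        if_neg hcond]
      rcases hs : (pvT ipa.toList ' ').foldl (pvG ((ipa.toList.length / 2 : Nat) : Int)) none with _ | j
      · simp
      · obtain ⟨k2, hk2, rfl⟩ := pvFoldCases _ _ _ hs
        simp only [Option.map_some]
        rw [if_pos (by omega)]
        simp only [Int.toNat_natCast]
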